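-- pv_equiv track=rewrite | github.com/dylanrylee/Blueprint-Game-Python | asg4.py | black_points
-- ===== SOURCE A (Python) =====
-- def black_points(table: list) -> int:
--     """
--     This checks what level the stone dice is in, the it will add a certain amount of points depending on it's level.
--     """
--     black_score = 0
--     #This counts x up to the range of tthe length of the table
--     #This then counts y up to the range of the length of x row
--     for x in range(0, len(table), 1):
--         for y in range(0, len(table[x]), 1):
--             if 'S' in table[x][y]:
--                 #This is looking at the table, going up to the 4th row and above.
--                 #If 'S' is in the index, increment the points by 8
--                 if x <= len(table) - 4:
--                     black_score += 8
--                 #This is looking at the table, going up to the 3rd row.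
--                 #If 'S' is in the index, increment the points by 5
--                 elif x == len(table) - 3:
--                     black_score += 5
--                 #This is looking at the table, going up to the 2nd row.
--                 #If 'S' is in the index, increment the points by 3
--                 elif x == len(table) - 2:
--                     black_score += 3
--                 #This is looking at the table, looking only at the 1st row.
--                 #If 'S' is in the index, increment the points by 2
--                 else:
--                     black_score += 2
--     return black_score
-- ===== SOURCE B (Python) =====
-- def black_points(table: list) -> int:
--     """Global 8x weight for every 'S' cell, then subtract the bottom-three-row
--     corrections (6, 5, 3) from the reversed row counts."""
--     counts = [sum(1 for cell in row if 'S' in cell) for row in table]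
--     total = 8 * sum(counts)
--     for d, c in zip((6, 5, 3), reversed(counts)):
--         total -= d * c
--     return total
-- ===== Notes on version B (the rewrite author's own statement) =====
-- stated objective: alternative
-- what changed: B first builds a per-row count list, scores every 'S' cell at the maximum weight 8 in one multiplication, and then subtracts fixed corrections (6,5,3) zipped against the reversed count list for the up-to-three bottom rows, eliminating A's per-cell level branching entirely.
import Mathlib
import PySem

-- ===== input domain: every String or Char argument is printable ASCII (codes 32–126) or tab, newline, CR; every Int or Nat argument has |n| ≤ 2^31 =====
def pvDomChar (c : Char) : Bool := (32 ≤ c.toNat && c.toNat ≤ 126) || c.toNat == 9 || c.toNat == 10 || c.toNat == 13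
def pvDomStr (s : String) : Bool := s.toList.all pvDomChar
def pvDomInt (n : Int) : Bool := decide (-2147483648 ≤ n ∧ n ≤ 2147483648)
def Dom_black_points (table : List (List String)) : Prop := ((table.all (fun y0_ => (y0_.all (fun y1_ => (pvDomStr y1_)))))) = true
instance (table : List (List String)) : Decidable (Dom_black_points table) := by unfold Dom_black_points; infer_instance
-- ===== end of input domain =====

-- B scores every 'S' cell at the maximum weight 8 via one per-row count list, then subtracts the
-- fixed corrections (6,5,3) zipped with the reversed counts for the bottom rows (objective: alternative).

-- ===== PORT A =====
def black_points (table : List (List String)) : Int :=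
  (PySem.List.pyRange 0 (table.length : Int) 1).foldl (fun acc x =>
    let row := PySem.List.pyGetD table x []
    (PySem.List.pyRange 0 (row.length : Int) 1).foldl (fun acc y =>
      let cell := PySem.List.pyGetD row y ""
      if PySem.Str.isIn "S" cell then
        if x ≤ (table.length : Int) - 4 then acc + 8
        else if x = (table.length : Int) - 3 then acc + 5
        else if x = (table.length : Int) - 2 then acc + 3
        else acc + 2
      else acc) acc) 0

-- ===== PORT B =====
def black_points_alt (table : List (List String)) : Int :=
  let counts : List Int :=
    table.map (fun row => ((row.filter (fun cell => PySem.Str.isIn "S" cell)).length : Int))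
  (List.zip [(6 : Int), 5, 3] counts.reverse).foldl (fun total p => total - p.1 * p.2)
    (8 * counts.sum)

-- ===== PRECONDITION & SPEC =====
def Spec_black_points (table : List (List String)) (out : Int) : Prop := out = black_points_alt table
instance (table : List (List String)) (out : Int) : Decidable (Spec_black_points table out) := by unfold Spec_black_points; infer_instance

-- ===== CLAIM (what is proved, stated in full; the proofs are below) =====
def Claim_equal_black_points : Prop := ∀ (table : List (List String)), Dom_black_points table → Spec_black_points table (black_points table)

-- ===== LEMMAS AND PROOFS =====

-- proof-side weight: A's nested level branches as a function of distance to the bottom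
def bWeight (remaining : Int) : Int :=
  if remaining ≥ 4 then 8 else if remaining = 3 then 5 else if remaining = 2 then 3 else 2

-- per-row 'S' count
def cntS (row : List String) : Int :=
  ((row.filter (fun cell => PySem.Str.isIn "S" cell)).length : Int)

-- weighted sum with the weight argument counting DOWN (A's traversal, top row first)
def hW : List Int → Int → Int
  | [], _ => 0
  | c :: l, r => bWeight r * c + hW l (r - 1)

-- weighted sum with the weight argument counting UP (bottom row first)
def gW : List Int → Int → Int
  | [], _ => 0
  | c :: l, r => bWeight r * c + gW l (r + 1)

-- A's inner per-cell loop over a row, weight fixed by the row index, is acc + weight * count.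
theorem inner_row (row : List String) (x n acc : Int) :
    (PySem.List.pyRange 0 (row.length : Int) 1).foldl (fun acc y =>
      let cell := PySem.List.pyGetD row y ""
      if PySem.Str.isIn "S" cell then
        if x ≤ n - 4 then acc + 8
        else if x = n - 3 then acc + 5
        else if x = n - 2 then acc + 3
        else acc + 2
      else acc) acc
    = acc + (if x ≤ n - 4 then (8:Int) else if x = n - 3 then 5 else if x = n - 2 then 3 else 2)
        * cntS row := by
  rw [PySem.List.foldl_pyRange_zero_pyGetD' row ""
      (fun acc cell =>
        if PySem.Str.isIn "S" cell then
          if x ≤ n - 4 then acc + 8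
          else if x = n - 3 then acc + 5
          else if x = n - 2 then acc + 3
          else acc + 2
        else acc) acc]
  induction row generalizing acc with
  | nil => simp [cntS]
  | cons c cs ih =>
    simp only [List.foldl_cons]
    by_cases h : PySem.Str.isIn "S" c
    · rw [if_pos h, ih]
      have h' : PySem.Chars.isIn ['S'] c.toList = true := by simpa using h
      have hc : cntS (c :: cs) = cntS cs + 1 := by
        simp [cntS, h']
      rw [hc]; split_ifs <;> ring
    · rw [if_neg h, ih]
      have h' : ¬ (PySem.Chars.isIn ['S'] c.toList = true) := by simpa using h
      have hc : cntS (c :: cs) = cntS cs := by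
        simp [cntS, h']
      rw [hc]

-- A's per-row weight equals the distance-to-bottom weight.
theorem weight_eq (x n : Int) :
    (if x ≤ n - 4 then (8:Int) else if x = n - 3 then 5 else if x = n - 2 then 3 else 2)
      = bWeight (n - x) := by
  unfold bWeight
  split_ifs <;> omega

-- A's outer loop over enumerated rows is hW on the count list.
theorem outer_loop (rows : List (List String)) (s n acc : Int) :
    (PySem.List.enumerate rows s).foldl (fun acc p => acc + bWeight (n - p.1) * cntS p.2) acc
      = acc + hW (rows.map cntS) (n - s) := by
  induction rows generalizing s acc with
  | nil => simp [PySem.List.enumerate, hW]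
  | cons r t ih =>
    rw [PySem.List.enumerate_cons, List.foldl_cons, ih]
    simp only [List.map_cons, hW]
    ring_nf

theorem gW_append (l1 l2 : List Int) (r : Int) :
    gW (l1 ++ l2) r = gW l1 r + gW l2 (r + l1.length) := by
  induction l1 generalizing r with
  | nil => simp [gW]
  | cons c l ih =>
    simp only [List.cons_append, gW, ih, List.length_cons]
    push_cast
    ring_nf

theorem hW_eq_gW (l : List Int) (r : Int) :
    hW l r = gW l.reverse (r - l.length + 1) := by
  induction l generalizing r with
  | nil => simp [hW, gW]
  | cons c t ih =>
    simp only [hW, List.reverse_cons, ih, gW_append, List.length_cons, List.length_reverse]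
    simp only [gW]
    push_cast
    ring_nf

theorem gW_high (l : List Int) (r : Int) (h : 4 ≤ r) : gW l r = 8 * l.sum := by
  induction l generalizing r with
  | nil => simp [gW]
  | cons c t ih =>
    simp only [gW, List.sum_cons, ih (r + 1) (by omega)]
    have hw : bWeight r = 8 := by unfold bWeight; rw [if_pos h]
    rw [hw]; ring

-- bottom-first weighted sum = 8 * total minus the zipped corrections
theorem gW_one (l : List Int) :
    gW l 1 = (List.zip [(6:Int), 5, 3] l).foldl (fun total p => total - p.1 * p.2) (8 * l.sum) := by
  match l with
  | [] => simp [gW]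
  | [a] => simp [gW, bWeight]; ring
  | [a, b] => simp [gW, bWeight]; ring
  | a :: b :: c :: rest =>
    simp only [gW, List.zip_cons_cons, List.zip_nil_left, List.foldl_cons, List.foldl_nil,
      List.sum_cons]
    norm_num
    rw [gW_high rest 4 (by norm_num)]
    norm_num [bWeight]
    ring

-- ===== VERDICT (by name: the statement is the Claim_ definition above) =====
theorem black_points_spec : Claim_equal_black_points := by
  intro table _
  unfold Spec_black_points black_points black_points_alt
  simp only [inner_row, weight_eq]
  have h2 := outer_loop table 0 (table.length : Int) 0
  rw [PySem.List.enumerate_eq_map_pyRange table ([] : List String), List.foldl_map] at h2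
  simp only [PySem.List.len_eq] at h2
  rw [h2]
  rw [show ((table.length : Int) - 0) = ((table.map cntS).length : Int) by simp]
  rw [hW_eq_gW]
  simp only [sub_self, zero_add, zero_add]
  rw [gW_one, List.sum_reverse]
  rfl
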